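-- pv_equiv track=rewrite | github.com/facebookresearch/ParlAI | parlai/tasks/onecommon/agents.py | _split_dialogue
-- ===== SOURCE A (Python) =====
-- EOS_TOKEN = '<eos>'
--
-- YOU_TOKEN = 'YOU:'
--
-- THEM_TOKEN = 'THEM:'
--
-- def _split_dialogue(words, separator=EOS_TOKEN):
--     sentences = []
--     spans = []
--     start = 0
--     for stop in range(len(words)):
--         if words[stop] == separator:
--             sentences.append(words[start:stop])
--             spans.append((start, stop))
--             start = stop + 1
--     if stop >= start:
--         sentences.append(words[start:])
--         spans.append((start, len(words) - 1))
--
--     # Dataset contains consecutive turn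
--     # concatenate utterances for those cases
--     dialogue = []
--     utterance = sentences[0]
--     for i in range(1, len(sentences)):
--         if sentences[i - 1][0] == sentences[i][0]:
--             utterance += sentences[i][1:]
--         else:
--             dialogue.append(utterance)
--             utterance = sentences[i]
--     dialogue.append(utterance)
--
--     if dialogue[0][0] == YOU_TOKEN:
--         # Dialogue starts with YOU
--         dialogue.insert(0, None)
--         spans.insert(0, None)
--     if dialogue[-1][0] == THEM_TOKEN:
--         # Dialogue starts with THEM
--         dialogue.append(None)
--         spans.append(None)
--
--     return dialogue, spans
-- ===== SOURCE B (Python) =====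
-- EOS_TOKEN = '<eos>'
--
-- YOU_TOKEN = 'YOU:'
--
-- THEM_TOKEN = 'THEM:'
--
--
-- def _absorb(dialogue, utterance, prev_first, seg):
--     # Fold one segment into the running dialogue state.
--     if prev_first is not None and seg[0] == prev_first:
--         return dialogue, utterance + seg[1:], seg[0]
--     if utterance is not None:
--         dialogue = dialogue + [utterance]
--     return dialogue, seg, seg[0]
--
--
-- def _split_dialogue(words, separator=EOS_TOKEN):
--     # Single pass: no intermediate sentences list; utterances are merged online.
--     dialogue = []
--     spans = []
--     utterance = None
--     prev_first = None
--     start = 0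
--     for stop, word in enumerate(words):
--         if word == separator:
--             spans.append((start, stop))
--             dialogue, utterance, prev_first = _absorb(
--                 dialogue, utterance, prev_first, words[start:stop]
--             )
--             start = stop + 1
--     if start < len(words):
--         spans.append((start, len(words) - 1))
--         dialogue, utterance, prev_first = _absorb(
--             dialogue, utterance, prev_first, words[start:]
--         )
--     dialogue.append(utterance)
--
--     if dialogue[0][0] == YOU_TOKEN:
--         dialogue.insert(0, None)
--         spans.insert(0, None)
--     if dialogue[-1][0] == THEM_TOKEN:
--         dialogue.append(None)
--         spans.append(None)
--
--     return dialogue, spans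
-- ===== Notes on version B (the rewrite author's own statement) =====
-- stated objective: alternative
-- what changed: A builds an intermediate sentences list in one loop and then runs a second merging pass over it (plus a leftover-loop-variable test for the trailing segment); B is a single pass over enumerate(words) that absorbs each segment online into the running (dialogue, utterance, prev_first) state via a fold helper, never materialising the sentences list.
import Mathlib
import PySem

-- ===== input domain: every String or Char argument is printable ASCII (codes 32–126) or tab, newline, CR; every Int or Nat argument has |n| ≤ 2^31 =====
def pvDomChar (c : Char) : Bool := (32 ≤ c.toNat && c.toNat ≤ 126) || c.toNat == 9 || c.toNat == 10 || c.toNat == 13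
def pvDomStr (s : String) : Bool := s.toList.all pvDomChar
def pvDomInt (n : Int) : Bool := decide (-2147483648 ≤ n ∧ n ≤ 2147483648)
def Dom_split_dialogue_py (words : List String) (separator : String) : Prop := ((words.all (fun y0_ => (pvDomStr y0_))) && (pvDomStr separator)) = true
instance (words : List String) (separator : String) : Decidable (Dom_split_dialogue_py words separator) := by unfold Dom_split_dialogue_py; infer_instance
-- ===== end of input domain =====

-- B re-implements A's two-phase split (segment list, then a second merging pass) as ONE pass that
-- merges consecutive same-speaker segments online; objective: simpler/alternative, equal return value.

-- ===== PORT A =====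
-- body of A's first for-loop: on a separator, emit the segment words[start:stop] and its span
def pvStepA (words : List String) (separator : String)
    (st : List (List String) × List (Int × Int) × Int) (i : Int) :
    List (List String) × List (Int × Int) × Int :=
  if PySem.List.pyGetD words i "" = separator then
    (st.1 ++ [PySem.List.slice words (some st.2.2) (some i)], st.2.1 ++ [(st.2.2, i)], i + 1)
  else st

-- body of A's second for-loop over range(1, len(sentences)) (list accesses via pyGetD; in range under Pre_)
def pvMergeStep (sentences : List (List String))
    (du : List (List String) × List String) (i : Int) :
    List (List String) × List String :=
  if (PySem.List.pyGetD sentences (i - 1) []).headD "" =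
     (PySem.List.pyGetD sentences i []).headD "" then
    (du.1, du.2 ++ (PySem.List.pyGetD sentences i []).tail)
  else (du.1 ++ [du.2], PySem.List.pyGetD sentences i [])

def split_dialogue_py (words : List String) (separator : String) :
    List (Option (List String)) × (List (Option (Int × Int))) :=
  let n : Int := words.length
  -- for stop in range(len(words)): …  (state: sentences, spans, start)
  let s1 := (PySem.List.pyRange 0 n).foldl (pvStepA words separator) ([], [], 0)
  -- if stop >= start: append trailing segment (stop is the leftover loop variable, n-1)
  let s2 : List (List String) × List (Int × Int) :=
    if n - 1 ≥ s1.2.2 then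
      (s1.1 ++ [PySem.List.slice words (some s1.2.2) none], s1.2.1 ++ [(s1.2.2, n - 1)])
    else (s1.1, s1.2.1)
  let sentences := s2.1
  let spans := s2.2
  -- utterance = sentences[0]; for i in range(1, len(sentences)): …
  let du := (PySem.List.pyRange 1 (sentences.length : Int)).foldl
              (pvMergeStep sentences) ([], sentences.headD [])
  let dialogue := du.1 ++ [du.2]
  let dialogueO : List (Option (List String)) := dialogue.map some
  let spansO : List (Option (Int × Int)) := spans.map some
  -- if dialogue[0][0] == YOU_TOKEN: insert None at the front of both lists
  let r1 : List (Option (List String)) × List (Option (Int × Int)) :=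
    if (dialogue.headD []).headD "" = "YOU:" then (none :: dialogueO, none :: spansO)
    else (dialogueO, spansO)
  -- if dialogue[-1][0] == THEM_TOKEN: append None to both lists
  -- (a possible front insert does not change dialogue's last element: dialogue is nonempty)
  if (dialogue.getLastD []).headD "" = "THEM:" then (r1.1 ++ [none], r1.2 ++ [none])
  else r1

-- ===== PORT B =====
-- _absorb of Source B: fold one segment into the running (dialogue, utterance, prev_first) state
def pvAbsorb (ms : List (List String) × Option (List String) × Option String)
    (seg : List String) : List (List String) × Option (List String) × Option String :=
  if ms.2.2 = some (seg.headD "") then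
    (ms.1, some ((ms.2.1.getD []) ++ seg.tail), some (seg.headD ""))
  else
    (ms.1 ++ (match ms.2.1 with | some u => [u] | none => []), some seg, some (seg.headD ""))

-- body of B's single for-loop over enumerate(words)
def pvStepB (words : List String) (separator : String)
    (st : (List (List String) × Option (List String) × Option String) × List (Int × Int) × Int)
    (p : Int × String) :
    (List (List String) × Option (List String) × Option String) × List (Int × Int) × Int :=
  if p.2 = separator then
    (pvAbsorb st.1 (PySem.List.slice words (some st.2.2) (some p.1)),
     st.2.1 ++ [(st.2.2, p.1)], p.1 + 1)
  else st

def split_dialogue_py_alt (words : List String) (separator : String) :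
    List (Option (List String)) × (List (Option (Int × Int))) :=
  let n : Int := words.length
  -- for stop, word in enumerate(words): …  (state: (dialogue, utterance, prev_first), spans, start)
  let st := (PySem.List.enumerate words).foldl (pvStepB words separator) ((([], none, none)), [], 0)
  -- if start < len(words): absorb the trailing segment
  let st2 : (List (List String) × Option (List String) × Option String) × List (Int × Int) :=
    if st.2.2 < n then
      (pvAbsorb st.1 (PySem.List.slice words (some st.2.2) none),
       st.2.1 ++ [(st.2.2, n - 1)])
    else (st.1, st.2.1)
  -- dialogue.append(utterance)
  let dialogue := st2.1.1 ++ [st2.1.2.1.getD []]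
  let spans := st2.2
  let dialogueO : List (Option (List String)) := dialogue.map some
  let spansO : List (Option (Int × Int)) := spans.map some
  let r1 : List (Option (List String)) × List (Option (Int × Int)) :=
    if (dialogue.headD []).headD "" = "YOU:" then (none :: dialogueO, none :: spansO)
    else (dialogueO, spansO)
  if (dialogue.getLastD []).headD "" = "THEM:" then (r1.1 ++ [none], r1.2 ++ [none])
  else r1

-- ===== PRECONDITION & SPEC =====
-- Pre_ excludes exactly the inputs on which A raises: empty words (UnboundLocalError on the leftover
-- loop variable) and a separator as first word or two adjacent separators (empty segment → IndexError).
def Pre_split_dialogue_py (words : List String) (separator : String) : Prop :=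
  words ≠ [] ∧ words.head? ≠ some separator ∧
    ∀ p ∈ words.zip words.tail, ¬(p.1 = separator ∧ p.2 = separator)
instance (words : List String) (separator : String) : Decidable (Pre_split_dialogue_py words separator) := by unfold Pre_split_dialogue_py; infer_instance

def pvWitness_split_dialogue_py : List String × String :=
  (["THEM:", "hi", "<eos>", "YOU:", "ok"], "<eos>")

def Spec_split_dialogue_py (words : List String) (separator : String) (out : List (Option (List String)) × (List (Option (Int × Int)))) : Prop := out = split_dialogue_py_alt words separator
instance (words : List String) (separator : String) (out : List (Option (List String)) × (List (Option (Int × Int)))) : Decidable (Spec_split_dialogue_py words separator out) := by unfold Spec_split_dialogue_py; infer_instance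

-- ===== CLAIM (what is proved, stated in full; the proofs are below) =====
def Claim_equal_split_dialogue_py : Prop := ∀ (words : List String) (separator : String), Dom_split_dialogue_py words separator → Pre_split_dialogue_py words separator → Spec_split_dialogue_py words separator (split_dialogue_py words separator)

-- ===== LEMMAS AND PROOFS =====

-- the merge-state of a list of segments: what B's online merging reaches after absorbing them all
def pvMfold (segs : List (List String)) :
    List (List String) × Option (List String) × Option String :=
  segs.foldl pvAbsorb ([], none, none)

-- the homomorphism from A's loop state to B's
def pvPhi (st : List (List String) × List (Int × Int) × Int) :
    (List (List String) × Option (List String) × Option String) × List (Int × Int) × Int :=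
  (pvMfold st.1, st.2.1, st.2.2)

-- A's phase-1 state and the (sentences, spans) pair after the trailing-segment step
def pvS1 (words : List String) (separator : String) :
    List (List String) × List (Int × Int) × Int :=
  (PySem.List.pyRange 0 ((words.length : Int))).foldl (pvStepA words separator) ([], [], 0)

def pvS2 (words : List String) (separator : String) :
    List (List String) × List (Int × Int) :=
  if (words.length : Int) - 1 ≥ (pvS1 words separator).2.2 then
    ((pvS1 words separator).1 ++
       [PySem.List.slice words (some (pvS1 words separator).2.2) none],
     (pvS1 words separator).2.1 ++
       [((pvS1 words separator).2.2, (words.length : Int) - 1)])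
  else ((pvS1 words separator).1, (pvS1 words separator).2.1)

-- the common ending of both programs (None insertions), as a function of dialogue and spans
def pvFinish (dialogue : List (List String)) (spans : List (Int × Int)) :
    List (Option (List String)) × List (Option (Int × Int)) :=
  let dialogueO : List (Option (List String)) := dialogue.map some
  let spansO : List (Option (Int × Int)) := spans.map some
  let r1 : List (Option (List String)) × List (Option (Int × Int)) :=
    if (dialogue.headD []).headD "" = "YOU:" then (none :: dialogueO, none :: spansO)
    else (dialogueO, spansO)
  if (dialogue.getLastD []).headD "" = "THEM:" then (r1.1 ++ [none], r1.2 ++ [none]) else r1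

lemma pvMfold_concat (segs : List (List String)) (s : List String) :
    pvMfold (segs ++ [s]) = pvAbsorb (pvMfold segs) s := by
  simp [pvMfold]

lemma pvStep_comm (words : List String) (separator : String)
    (st : List (List String) × List (Int × Int) × Int) (i : Int) :
    pvStepB words separator (pvPhi st) (i, PySem.List.pyGetD words i "") =
      pvPhi (pvStepA words separator st i) := by
  simp only [pvStepA, pvStepB]
  split
  · simp [pvPhi, pvMfold_concat]
  · rfl

-- phase-1 fusion: B's single fold over enumerate(words) is φ of A's fold over range(len(words))
lemma pvPhase1 (words : List String) (separator : String) :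
    (PySem.List.enumerate words).foldl (pvStepB words separator) (([], none, none), [], 0) =
      pvPhi (pvS1 words separator) := by
  have h0 : ((([], none, none) : List (List String) × Option (List String) × Option String),
      ([] : List (Int × Int)), (0 : Int)) = pvPhi ([], [], 0) := rfl
  rw [PySem.List.enumerate_eq_map_pyRange words "", List.foldl_map, h0]
  exact List.foldl_hom pvPhi (fun st i => pvStep_comm words separator st i)

-- the pairs (sentences[i-1], sentences[i]) scanned by A's second loop are the adjacent pairs
lemma pvPairs (sents : List (List String)) :
    (PySem.List.pyRange 1 (sents.length : Int)).map
        (fun i => ((PySem.List.pyGetD sents (i - 1) []), (PySem.List.pyGetD sents i []))) =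
      sents.zip sents.tail := by
  apply List.ext_getElem
  · simp [PySem.List.length_pyRange_one, List.length_zip, List.length_tail]
  · intro k h1 h2
    have hk : k < sents.length - 1 := by
      simp only [List.length_zip, List.length_tail] at h2; omega
    have hrange : k < (PySem.List.pyRange 1 (sents.length : Int)).length := by
      simp only [PySem.List.length_pyRange_one]; omega
    have e1 : PySem.List.pyGetD sents (1 + (k : Int) - 1) [] = sents[k] := by
      rw [PySem.List.pyGetD_eq_getElem sents [] (by omega) (by omega)]
      simp
    have e2 : PySem.List.pyGetD sents (1 + (k : Int)) [] = sents[k + 1] := by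
      rw [PySem.List.pyGetD_eq_getElem sents [] (by omega) (by omega)]
      have : ((1 : Int) + (k : Int)).toNat = k + 1 := by omega
      simp [this]
    simp only [List.getElem_map, PySem.List.getElem_pyRange_one, List.getElem_zip,
      List.getElem_tail, e1, e2]

-- the step of A's merge loop, expressed on the (prev, cur) pair it reads
def pvMergeStep' (du : List (List String) × List String) (p : List String × List String) :
    List (List String) × List String :=
  if p.1.headD "" = p.2.headD "" then (du.1, du.2 ++ p.2.tail)
  else (du.1 ++ [du.2], p.2)

-- A's merge loop over adjacent pairs computes the same dialogue as folding pvAbsorb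
lemma pvMergeZip (rest : List (List String)) :
    ∀ (prev : List String) (d : List (List String)) (u : List String),
      (((prev :: rest).zip rest).foldl pvMergeStep' (d, u)).1 ++
          [(((prev :: rest).zip rest).foldl pvMergeStep' (d, u)).2] =
        (rest.foldl pvAbsorb (d, some u, some (prev.headD ""))).1 ++
          [(rest.foldl pvAbsorb (d, some u, some (prev.headD ""))).2.1.getD []] := by
  induction rest with
  | nil => intro prev d u; simp
  | cons cur rest' ih =>
    intro prev d u
    simp only [List.zip_cons_cons, List.foldl_cons]
    by_cases h : prev.headD "" = cur.headD ""
    · have ha : pvAbsorb (d, some u, some (prev.headD "")) cur =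
          (d, some (u ++ cur.tail), some (cur.headD "")) := by
        simp only [pvAbsorb]; rw [if_pos (by rw [h])]; rfl
      have hm : pvMergeStep' (d, u) (prev, cur) = (d, u ++ cur.tail) := by
        simp only [pvMergeStep']; rw [if_pos h]
      rw [hm, ha]; exact ih cur d (u ++ cur.tail)
    · have ha : pvAbsorb (d, some u, some (prev.headD "")) cur =
          (d ++ [u], some cur, some (cur.headD "")) := by
        simp only [pvAbsorb]
        rw [if_neg (fun hc => h (Option.some_injective _ hc))]
      have hm : pvMergeStep' (d, u) (prev, cur) = (d ++ [u], cur) := by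
        simp only [pvMergeStep']; rw [if_neg h]
      rw [hm, ha]; exact ih cur (d ++ [u]) cur

-- A's whole second phase equals assembling B's merge-state
lemma pvMerge (sents : List (List String)) :
    ((PySem.List.pyRange 1 (sents.length : Int)).foldl (pvMergeStep sents)
        ([], sents.headD [])).1 ++
      [((PySem.List.pyRange 1 (sents.length : Int)).foldl (pvMergeStep sents)
        ([], sents.headD [])).2] =
      (pvMfold sents).1 ++ [(pvMfold sents).2.1.getD []] := by
  have hstep : (PySem.List.pyRange 1 (sents.length : Int)).foldl (pvMergeStep sents)
      ([], sents.headD []) =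
      (sents.zip sents.tail).foldl pvMergeStep' ([], sents.headD []) := by
    rw [← pvPairs sents, List.foldl_map]
    rfl
  rw [hstep]
  cases sents with
  | nil => simp [pvMfold]
  | cons s0 rest =>
    have h0 : pvMfold (s0 :: rest) =
        rest.foldl pvAbsorb ([], some s0, some (s0.headD "")) := by
      simp [pvMfold, pvAbsorb]
    rw [h0]
    simpa using pvMergeZip rest s0 [] s0

-- A's port, written through the phase helpers
lemma pvA_eq (words : List String) (separator : String) :
    split_dialogue_py words separator =
      pvFinish
        (((PySem.List.pyRange 1 (((pvS2 words separator).1.length : Int))).foldl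
            (pvMergeStep (pvS2 words separator).1) ([], (pvS2 words separator).1.headD [])).1 ++
          [((PySem.List.pyRange 1 (((pvS2 words separator).1.length : Int))).foldl
            (pvMergeStep (pvS2 words separator).1) ([], (pvS2 words separator).1.headD [])).2])
        ((pvS2 words separator).2) := rfl

-- B's port, written through the phase helpers
lemma pvB_eq (words : List String) (separator : String) :
    split_dialogue_py_alt words separator =
      pvFinish
        ((pvMfold (pvS2 words separator).1).1 ++ [(pvMfold (pvS2 words separator).1).2.1.getD []])
        ((pvS2 words separator).2) := by
  have h1 := pvPhase1 words separator
  simp only [split_dialogue_py_alt, h1, pvPhi, pvFinish]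
  by_cases hc : (pvS1 words separator).2.2 < ((words.length : Int))
  · rw [if_pos hc]
    have h2 : pvS2 words separator =
        ((pvS1 words separator).1 ++
           [PySem.List.slice words (some (pvS1 words separator).2.2) none],
         (pvS1 words separator).2.1 ++
           [((pvS1 words separator).2.2, (words.length : Int) - 1)]) := by
      rw [pvS2, if_pos (by omega)]
    rw [h2, pvMfold_concat]
  · rw [if_neg hc]
    have h2 : pvS2 words separator =
        ((pvS1 words separator).1, (pvS1 words separator).2.1) := by
      rw [pvS2, if_neg (by omega)]
    rw [h2]

-- ===== VERDICT (by name: the statement is the Claim_ definition above) =====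
theorem split_dialogue_py_spec : Claim_equal_split_dialogue_py := by
  intro words separator _ _
  unfold Spec_split_dialogue_py
  rw [pvA_eq, pvB_eq, pvMerge]
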